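-- pv_equiv track=rewrite | github.com/olihb/cnn_analysis | label_position.py | get_spiral
-- ===== SOURCE A (Python) =====
-- def get_spiral(num_points, steps=1):
--     # source: http://stackoverflow.com/questions/398299
--     last_coord = (0,0)
--     di = 1
--     dj = 0
--     segment_length = 1
--     i = 0
--     j = 0
--     segment_passed = 0
--     for k in range(num_points):
--         i += di
--         j += dj
--         segment_passed += 1
--         last_coord=(i,j)
--         if (segment_passed == segment_length):
--             segment_passed = 0
--             buffer = di
--             di = -dj
--             dj = buffer
--             if (dj == 0):
--                 segment_length += 1
--     return (last_coord[0]*steps, last_coord[1]*steps)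
-- ===== SOURCE B (Python) =====
-- def get_spiral(num_points, steps=1):
--     # Segment-jumping: consume the spiral arm by arm (lengths 1,1,2,2,3,3,...)
--     # instead of stepping point by point: O(sqrt(n)) iterations instead of O(n).
--     n = num_points
--     x = 0
--     y = 0
--     d = 0
--     seg = 1
--     while n > 0:
--         t = seg if seg < n else n
--         dx, dy = ((1, 0), (0, 1), (-1, 0), (0, -1))[d]
--         x += dx * t
--         y += dy * t
--         n -= t
--         d = (d + 1) % 4
--         if d % 2 == 0:
--             seg += 1
--     return (x * steps, y * steps)
-- ===== Notes on version B (the rewrite author's own statement) =====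
-- stated objective: faster
-- what changed: A walks the spiral one point at a time (O(n) iterations with rotation bookkeeping); B jumps over whole spiral arms (lengths 1,1,2,2,3,3,...), consuming min(segment, remaining) steps per iteration, so it runs O(sqrt(n)) iterations.
import Mathlib
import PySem

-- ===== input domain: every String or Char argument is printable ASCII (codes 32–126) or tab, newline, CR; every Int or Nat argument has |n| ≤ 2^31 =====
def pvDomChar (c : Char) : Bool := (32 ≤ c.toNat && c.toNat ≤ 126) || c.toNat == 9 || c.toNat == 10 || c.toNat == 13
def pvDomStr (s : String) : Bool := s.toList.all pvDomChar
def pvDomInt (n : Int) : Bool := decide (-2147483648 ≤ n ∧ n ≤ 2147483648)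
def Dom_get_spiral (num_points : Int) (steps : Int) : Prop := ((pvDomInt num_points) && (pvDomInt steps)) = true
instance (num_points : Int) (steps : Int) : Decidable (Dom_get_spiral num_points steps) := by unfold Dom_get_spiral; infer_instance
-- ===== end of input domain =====

-- B replaces A's point-by-point walk by a segment-jumping loop (spiral arm lengths
-- 1,1,2,2,3,3,…), consuming a whole arm per iteration: asymptotically faster.

-- ===== PORT A =====
-- loop state of A: position (i,j), direction (di,dj), segment_length, segment_passed, last_coord
structure StA where
  i : Int
  j : Int
  di : Int
  dj : Int
  segLen : Int
  segPassed : Int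
  lc1 : Int
  lc2 : Int
deriving DecidableEq, Repr

def stepA (s : StA) : StA :=
  let i := s.i + s.di
  let j := s.j + s.dj
  let sp := s.segPassed + 1
  if sp = s.segLen then
    let di := -s.dj
    let dj := s.di
    { i := i, j := j, di := di, dj := dj,
      segLen := if dj = 0 then s.segLen + 1 else s.segLen,
      segPassed := 0, lc1 := i, lc2 := j }
  else
    { i := i, j := j, di := s.di, dj := s.dj,
      segLen := s.segLen, segPassed := sp, lc1 := i, lc2 := j }

def get_spiral (num_points : Int) (steps : Int) : List Int :=
  let s := (PySem.List.pyRange 0 num_points 1).foldl (fun s _ => stepA s)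
             ⟨0, 0, 1, 0, 1, 0, 0, 0⟩
  [s.lc1 * steps, s.lc2 * steps]

-- ===== PORT B =====
-- ((1,0),(0,1),(-1,0),(0,-1))[d] for d in 0..3
def dirB (d : Int) : Int × Int :=
  if d = 0 then (1, 0) else if d = 1 then (0, 1) else if d = 2 then (-1, 0) else (0, -1)

-- B's while-loop; the `1 ≤ seg` conjunct only certifies termination (B always calls
-- it with seg ≥ 1, so it is never the reason the loop stops).
def loopB (n x y d seg : Int) : Int × Int :=
  if _h : 0 < n ∧ 1 ≤ seg then
    let t := if seg < n then seg else n
    let p := dirB d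
    let d' := PySem.Int.mod (d + 1) 4
    loopB (n - t) (x + p.1 * t) (y + p.2 * t) d'
      (if PySem.Int.mod d' 2 = 0 then seg + 1 else seg)
  else (x, y)
termination_by n.toNat
decreasing_by split_ifs <;> omega

def get_spiral_alt (num_points : Int) (steps : Int) : List Int :=
  let p := loopB num_points 0 0 0 1
  [p.1 * steps, p.2 * steps]

-- ===== PRECONDITION & SPEC =====
def Spec_get_spiral (num_points : Int) (steps : Int) (out : List Int) : Prop := out = get_spiral_alt num_points steps
instance (num_points : Int) (steps : Int) (out : List Int) : Decidable (Spec_get_spiral num_points steps out) := by unfold Spec_get_spiral; infer_instance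

-- ===== CLAIM (what is proved, stated in full; the proofs are below) =====
def Claim_equal_get_spiral : Prop := ∀ (num_points : Int) (steps : Int), Dom_get_spiral num_points steps → Spec_get_spiral num_points steps (get_spiral num_points steps)

-- ===== LEMMAS AND PROOFS =====

def loopA : Nat → StA → StA
  | 0, s => s
  | n + 1, s => loopA n (stepA s)

theorem foldl_eq_loopA : ∀ (l : List Int) (s : StA), l.foldl (fun s _ => stepA s) s = loopA l.length s := by
  intro l
  induction l with
  | nil => intro s; rfl
  | cons a t ih => intro s; simpa [List.foldl, loopA] using ih (stepA s)

theorem loopA_add (a b : Nat) (s : StA) : loopA (a + b) s = loopA b (loopA a s) := by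
  induction a generalizing s with
  | zero => simp [loopA]
  | succ a ih =>
      have h : a + 1 + b = (a + b) + 1 := by omega
      rw [h]
      show loopA (a + b) (stepA s) = loopA b (loopA a (stepA s))
      exact ih (stepA s)

-- walking a full segment: m+1 steps from segment start to the rotated state
theorem seg_walk : ∀ (m : Nat) (i j di dj seg sp l1 l2 : Int),
    sp + ((m : Int) + 1) = seg →
    loopA (m + 1) ⟨i, j, di, dj, seg, sp, l1, l2⟩ =
      ⟨i + di * ((m : Int) + 1), j + dj * ((m : Int) + 1), -dj, di,
        (if di = 0 then seg + 1 else seg), 0,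
        i + di * ((m : Int) + 1), j + dj * ((m : Int) + 1)⟩ := by
  intro m
  induction m with
  | zero =>
      intro i j di dj seg sp l1 l2 h
      show loopA 0 (stepA _) = _
      simp only [loopA, stepA]
      rw [if_pos (by omega : sp + 1 = seg)]
      simp only [StA.mk.injEq]
      push_cast
      refine ⟨by ring, by ring, trivial, trivial, trivial, trivial, by ring, by ring⟩
  | succ m ih =>
      intro i j di dj seg sp l1 l2 h
      show loopA (m + 1) (stepA _) = _
      have hne : ¬ (sp + 1 = seg) := by push_cast at h; omega
      simp only [stepA, if_neg hne]
      have h2 := ih (i + di) (j + dj) di dj seg (sp + 1) (i + di) (j + dj)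
        (by push_cast at h; omega)
      rw [h2]
      simp only [StA.mk.injEq]
      push_cast
      refine ⟨by ring, by ring, trivial, trivial, trivial, trivial, by ring, by ring⟩

-- walking a partial segment: t steps strictly inside the segment
theorem part_walk : ∀ (t : Nat) (i j di dj seg sp : Int),
    sp + (t : Int) < seg →
    loopA t ⟨i, j, di, dj, seg, sp, i, j⟩ =
      ⟨i + di * (t : Int), j + dj * (t : Int), di, dj, seg, sp + (t : Int),
        i + di * (t : Int), j + dj * (t : Int)⟩ := by
  intro t
  induction t with
  | zero =>
      intro i j di dj seg sp h
      simp [loopA]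
  | succ t ih =>
      intro i j di dj seg sp h
      show loopA t (stepA _) = _
      have hne : ¬ (sp + 1 = seg) := by push_cast at h; omega
      simp only [stepA, if_neg hne]
      have h2 := ih (i + di) (j + dj) di dj seg (sp + 1) (by push_cast at h; omega)
      rw [h2]
      simp only [StA.mk.injEq]
      push_cast
      refine ⟨by ring, by ring, trivial, trivial, trivial, by ring, by ring, by ring⟩

theorem main_lemma : ∀ (n : Nat) (i j d seg : Int), 0 ≤ d → d < 4 → 1 ≤ seg →
    ((loopA n ⟨i, j, (dirB d).1, (dirB d).2, seg, 0, i, j⟩).lc1,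
     (loopA n ⟨i, j, (dirB d).1, (dirB d).2, seg, 0, i, j⟩).lc2) =
      loopB (n : Int) i j d seg := by
  intro n
  induction n using Nat.strong_induction_on with
  | _ n IH =>
    intro i j d seg hd0 hd4 hseg
    rcases Nat.eq_zero_or_pos n with hn | hn
    · subst hn
      rw [loopB.eq_def]
      simp [loopA]
    · by_cases hle : seg ≤ (n : Int)
      · -- full segment consumed
        have ht : (if seg < (n : Int) then seg else (n : Int)) = seg := by split <;> omega
        have hmn : seg.toNat ≤ n := by omega
        have hsplit : n = seg.toNat + (n - seg.toNat) := by omega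
        rw [loopB.eq_def]
        rw [dif_pos ⟨by exact_mod_cast hn, hseg⟩]
        simp only [ht]
        conv_lhs => rw [hsplit]
        rw [loopA_add]
        have hw := seg_walk (seg.toNat - 1) i j (dirB d).1 (dirB d).2 seg 0 i j
          (by omega)
        have hmm : (seg.toNat - 1) + 1 = seg.toNat := by omega
        rw [hmm] at hw
        have hcast : ((seg.toNat - 1 : Nat) : Int) + 1 = seg := by omega
        rw [hcast] at hw
        rw [hw]
        have hkn : ((n - seg.toNat : Nat) : Int) = (n : Int) - seg := by omega
        have hk : n - seg.toNat < n := by omega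
        interval_cases d
        · have hIH := IH (n - seg.toNat) hk (i + 1 * seg) (j + 0 * seg) 1 seg
            (by norm_num) (by norm_num) hseg
          rw [hkn] at hIH
          have e1 : PySem.Int.mod ((0:Int) + 1) 4 = 1 := by decide
          have e2 : PySem.Int.mod (1:Int) 2 = 0 ↔ False := by decide
          simp only [dirB, e1, e2] at hIH ⊢
          norm_num at hIH ⊢
          exact hIH
        · have hIH := IH (n - seg.toNat) hk (i + 0 * seg) (j + 1 * seg) 2 (seg + 1)
            (by norm_num) (by norm_num) (by omega)
          rw [hkn] at hIH
          have e1 : PySem.Int.mod ((1:Int) + 1) 4 = 2 := by decide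
          have e2 : PySem.Int.mod (2:Int) 2 = 0 ↔ True := by decide
          simp only [dirB, e1, e2] at hIH ⊢
          norm_num at hIH ⊢
          exact hIH
        · have hIH := IH (n - seg.toNat) hk (i + (-1) * seg) (j + 0 * seg) 3 seg
            (by norm_num) (by norm_num) hseg
          rw [hkn] at hIH
          have e1 : PySem.Int.mod ((2:Int) + 1) 4 = 3 := by decide
          have e2 : PySem.Int.mod (3:Int) 2 = 0 ↔ False := by decide
          simp only [dirB, e1, e2] at hIH ⊢
          norm_num at hIH ⊢
          exact hIH
        · have hIH := IH (n - seg.toNat) hk (i + 0 * seg) (j + (-1) * seg) 0 (seg + 1)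
            (by norm_num) (by norm_num) (by omega)
          rw [hkn] at hIH
          have e1 : PySem.Int.mod ((3:Int) + 1) 4 = 0 := by decide
          have e2 : PySem.Int.mod (0:Int) 2 = 0 ↔ True := by decide
          simp only [dirB, e1, e2] at hIH ⊢
          norm_num at hIH ⊢
          exact hIH
      · -- partial final segment: loop ends inside the current segment
        have ht : (if seg < (n : Int) then seg else (n : Int)) = (n : Int) := by split <;> omega
        rw [loopB.eq_def]
        rw [dif_pos ⟨by exact_mod_cast hn, hseg⟩]
        simp only [ht]
        have hw := part_walk n i j (dirB d).1 (dirB d).2 seg 0 (by omega)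
        rw [hw]
        rw [sub_self]
        rw [loopB.eq_def]
        simp

-- ===== VERDICT (by name: the statement is the Claim_ definition above) =====
theorem get_spiral_spec : Claim_equal_get_spiral := by
  intro num_points steps _
  unfold Spec_get_spiral get_spiral get_spiral_alt
  rw [foldl_eq_loopA, PySem.List.length_pyRange_one]
  have hmain := main_lemma (num_points - 0).toNat 0 0 0 1 (by norm_num) (by norm_num) (by norm_num)
  have hBB : loopB (((num_points - 0).toNat : Nat) : Int) 0 0 0 1 = loopB num_points 0 0 0 1 := by
    have hcase : 0 ≤ num_points ∨ num_points < 0 := by omega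
    rcases hcase with h | h
    · congr 1; omega
    · have h1 : loopB (((num_points - 0).toNat : Nat) : Int) 0 0 0 1 = (0, 0) := by
        rw [loopB.eq_def]; rw [dif_neg (by omega)]
      have h2 : loopB num_points 0 0 0 1 = (0, 0) := by
        rw [loopB.eq_def]; rw [dif_neg (by omega)]
      rw [h1, h2]
  rw [hBB] at hmain
  simp only [dirB] at hmain
  norm_num at hmain
  simp only [Int.sub_zero]
  exact congrArg₂ (fun a b : Int => [a * steps, b * steps])
    (congrArg Prod.fst hmain) (congrArg Prod.snd hmain)
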